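-- pv_equiv track=rewrite | github.com/OpenMLRL/LLM_Collab_Minecraft | str_builder/utils/str_builder.py | block_to_color_key
-- ===== SOURCE A (Python) =====
-- def normalize_block_id(block_id: str) -> str:
--     s = (block_id or "").strip()
--     if s.startswith("minecraft:"):
--         s = s[len("minecraft:") :]
--     return s
--
-- _COLOR_PREFIXES = (
--     "light_blue",
--     "light_gray",
--     "orange",
--     "magenta",
--     "yellow",
--     "lime",
--     "pink",
--     "cyan",
--     "purple",
--     "blue",
--     "brown",
--     "green",
--     "red",
--     "black",
--     "white",
--     "gray",
-- )
--
-- def block_to_color_key(block_id: str) -> str: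
--     s = normalize_block_id(str(block_id or "")).lower()
--     if not s:
--         return ""
--     for color in _COLOR_PREFIXES:
--         if s == color or s.startswith(color + "_"):
--             return color
--     return s
-- ===== SOURCE B (Python) =====
-- _ONE_WORD_COLORS = frozenset((
--     "orange", "magenta", "yellow", "lime", "pink", "cyan", "purple",
--     "blue", "brown", "green", "red", "black", "white", "gray",
-- ))
--
-- def block_to_color_key(block_id: str) -> str:
--     s = str(block_id or "").strip()
--     if s.startswith("minecraft:"):
--         s = s[len("minecraft:"):]
--     s = s.lower()
--     if not s:
--         return ""
--     i = s.find("_")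
--     head = s if i < 0 else s[:i]
--     if head == "light":
--         j = s.find("_", i + 1)
--         two = s if j < 0 else s[:j]
--         if two == "light_blue" or two == "light_gray":
--             return two
--     if head in _ONE_WORD_COLORS:
--         return head
--     return s
-- ===== Notes on version B (the rewrite author's own statement) =====
-- stated objective: alternative
-- what changed: Instead of scanning all 16 colour names and prefix-testing each against the id, B extracts the id's first underscore-delimited word once (second word only when the first is 'light') and answers with a single frozenset membership test.
import Mathlib
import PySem

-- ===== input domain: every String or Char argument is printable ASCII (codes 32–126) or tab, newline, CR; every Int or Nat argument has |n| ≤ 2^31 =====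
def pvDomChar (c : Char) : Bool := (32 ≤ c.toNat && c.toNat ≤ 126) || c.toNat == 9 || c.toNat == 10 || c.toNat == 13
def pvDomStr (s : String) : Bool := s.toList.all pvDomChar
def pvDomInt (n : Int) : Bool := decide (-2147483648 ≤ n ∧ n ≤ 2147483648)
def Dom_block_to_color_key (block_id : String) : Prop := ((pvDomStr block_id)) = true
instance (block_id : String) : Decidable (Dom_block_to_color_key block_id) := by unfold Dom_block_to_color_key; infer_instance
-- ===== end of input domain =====

set_option maxRecDepth 8000

-- B replaces A's 16-iteration prefix-testing loop by extracting the one- or two-word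
-- underscore prefix of the id once (via find) and testing set membership (objective: alternative).

-- ===== PORT A =====
def normalize_block_id (block_id : String) : String :=
  let s := PySem.Str.strip block_id
  if PySem.Str.startswith s "minecraft:" then PySem.Str.slice s (some (PySem.Str.len "minecraft:")) none else s

def pvColorPrefixes : List String :=
  ["light_blue", "light_gray", "orange", "magenta", "yellow", "lime", "pink", "cyan",
   "purple", "blue", "brown", "green", "red", "black", "white", "gray"]

-- the 'for color in _COLOR_PREFIXES: … return color' loop with its early return
def pvColorLoop (s : String) : List String → String
  | [] => s
  | c :: cs => if s == c || PySem.Str.startswith s (c ++ "_") then c else pvColorLoop s cs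

def block_to_color_key (block_id : String) : String :=
  let s := PySem.Str.lower (normalize_block_id block_id)
  if s == "" then "" else pvColorLoop s pvColorPrefixes

-- ===== PORT B =====
def pvOneWordColors : PySem.Set String :=
  PySem.Set.ofList ["orange", "magenta", "yellow", "lime", "pink", "cyan", "purple",
                    "blue", "brown", "green", "red", "black", "white", "gray"]

-- body of Source B after the normalisation/lowercasing (the early return inside the
-- 'if head == "light"' block is modelled by the Option)
def pvAltKey (s : String) : String :=
  if s == "" then ""
  else
    let i := PySem.Str.find s "_"
    let head := if i < 0 then s else PySem.Str.slice s none (some i)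
    if head == "light" then
      let j := PySem.Str.findFrom s "_" (i + 1)
      let two := if j < 0 then s else PySem.Str.slice s none (some j)
      if two == "light_blue" || two == "light_gray" then two
      else if pvOneWordColors.contains head then head else s
    else if pvOneWordColors.contains head then head else s

def block_to_color_key_alt (block_id : String) : String :=
  let s0 := PySem.Str.strip block_id
  let s1 := if PySem.Str.startswith s0 "minecraft:" then PySem.Str.slice s0 (some (PySem.Str.len "minecraft:")) none else s0
  pvAltKey (PySem.Str.lower s1)

-- ===== PRECONDITION & SPEC =====
def Spec_block_to_color_key (block_id : String) (out : String) : Prop := out = block_to_color_key_alt block_id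
instance (block_id : String) (out : String) : Decidable (Spec_block_to_color_key block_id out) := by unfold Spec_block_to_color_key; infer_instance

-- ===== CLAIM (what is proved, stated in full; the proofs are below) =====
def Claim_equal_block_to_color_key : Prop := ∀ (block_id : String), Dom_block_to_color_key block_id → Spec_block_to_color_key block_id (block_to_color_key block_id)

-- ===== LEMMAS AND PROOFS =====

-- takeWhile/dropWhile on a list that is an all-good prefix, a failing element, a tail
theorem pv_takeWhile_append {α : Type} (p : α → Bool) (xs ys : List α) (y : α)
    (hx : ∀ a ∈ xs, p a = true) (hy : p y = false) :
    (xs ++ y :: ys).takeWhile p = xs := by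
  induction xs with
  | nil => simp [hy]
  | cons a as ih =>
    have ha : p a = true := hx a (by simp)
    simp only [List.cons_append, List.takeWhile_cons, ha, if_true]
    have := ih (fun a h => hx a (by simp [h]))
    simp [this]

-- the matching condition of A's loop for an underscore-free colour word
theorem pv_matches_one (c l : List Char) (hc : '_' ∉ c) :
    ((l == c) || PySem.Chars.startswith l (c ++ ['_'])) = true ↔
      c = l.takeWhile (fun a => a != '_') := by
  have hcall : ∀ a ∈ c, (a != '_') = true := by
    intro a ha; simp only [bne_iff_ne, ne_eq]; intro h; exact hc (h ▸ ha)
  constructor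
  · intro h
    rcases Bool.or_eq_true_iff.mp h with h | h
    · have : l = c := by simpa using h
      subst this
      exact (List.takeWhile_eq_self_iff.mpr hcall).symm
    · rcases (PySem.Chars.startswith_iff l (c ++ ['_'])).mp h with ⟨r, hr⟩
      have hl : l = c ++ '_' :: r := by simpa using hr.symm
      rw [hl, pv_takeWhile_append _ c r '_' hcall (by simp)]
  · intro h
    rcases hdw : l.dropWhile (fun a => a != '_') with _ | ⟨d, ds⟩
    · have : l = c := by
        conv_lhs => rw [← List.takeWhile_append_dropWhile (p := fun a => a != '_') (l := l)]
        rw [hdw, ← h]; simp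
      simp [this]
    · have hd : (d != '_') = false := by
        have := List.head_dropWhile_not (p := fun a => a != '_') (l := l) (by simp [hdw])
        simpa [hdw] using this
      have hd' : d = '_' := by simpa using hd
      have hl : l = c ++ '_' :: ds := by
        conv_lhs => rw [← List.takeWhile_append_dropWhile (p := fun a => a != '_') (l := l)]
        rw [hdw, ← h, hd']
      apply Bool.or_eq_true_iff.mpr; right
      apply (PySem.Chars.startswith_iff _ _).mpr
      rw [hl]
      exact ⟨ds, by simp⟩

-- Chars.find for a single underscore, in terms of takeWhile
theorem pv_find_underscore (l : List Char) :
    PySem.Chars.find l ['_'] =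
      if '_' ∈ l then ((l.takeWhile (fun a => a != '_')).length : Int) else -1 := by
  by_cases hmem : '_' ∈ l
  · simp only [hmem, if_true]
    have hinf : ['_'] <:+: l := by
      rcases List.mem_iff_append.mp hmem with ⟨s, t, hst⟩
      exact ⟨s, t, by simp [hst]⟩
    have hnn : 0 ≤ PySem.Chars.find l ['_'] :=
      (PySem.Chars.find_nonneg_iff l ['_']).mpr hinf
    obtain ⟨hpre, hmin⟩ := PySem.Chars.find_spec hnn
    set n := (PySem.Chars.find l ['_']).toNat with hn
    -- l = tw ++ '_' :: ds
    have hcall : ∀ a ∈ l.takeWhile (fun a => a != '_'), (a != '_') = true :=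
      fun a ha => List.mem_takeWhile_imp (p := fun a => a != '_') ha
    rcases hdw : l.dropWhile (fun a => a != '_') with _ | ⟨d, ds⟩
    · exfalso
      have : l.takeWhile (fun a => a != '_') = l := by
        conv_rhs => rw [← List.takeWhile_append_dropWhile (p := fun a => a != '_') (l := l)]
        rw [hdw]; simp
      have := hcall '_' (by rw [this]; exact hmem)
      simp at this
    · have hd' : d = '_' := by
        have := List.head_dropWhile_not (p := fun a => a != '_') (l := l) (by simp [hdw])
        simpa [hdw] using this
      have hl : l = l.takeWhile (fun a => a != '_') ++ '_' :: ds := by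
        conv_lhs => rw [← List.takeWhile_append_dropWhile (p := fun a => a != '_') (l := l)]
        rw [hdw, hd']
      set k := (l.takeWhile (fun a => a != '_')).length with hk
      -- n = k
      have hnk : n = k := by
        rcases lt_trichotomy n k with h | h | h
        · exfalso
          have hget : l[n]? = some '_' := by
            rcases hpre with ⟨r, hr⟩
            have : (l.drop n).head? = some '_' := by rw [← hr]; simp
            rwa [List.head?_drop] at this
          have : '_' ∈ l.takeWhile (fun a => a != '_') := by
            have hlt : n < (l.takeWhile (fun a => a != '_')).length := h
            have := List.getElem?_append_left (l₂ := '_' :: ds) hlt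
            rw [← hl] at this
            rw [this] at hget
            exact List.mem_of_getElem? hget
          have := hcall '_' this
          simp at this
        · exact h
        · exfalso
          apply hmin k h
          rw [hl, List.drop_append_of_le_length (by simp [hk])]
          simp [hk]
      omega
  · simp only [hmem, if_false]
    apply (PySem.Chars.find_eq_neg_one_iff l ['_']).mpr
    intro hinf
    exact hmem (hinf.subset (by simp))

-- A's loop returns s itself when no colour is a strict prefix and equality only hits s
theorem pv_loop_self (t : String) (cs : List String)
    (h : ∀ c ∈ cs, PySem.Str.startswith t (c ++ "_") = false) :
    pvColorLoop t cs = t := by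
  induction cs with
  | nil => rfl
  | cons c cs ih =>
    simp only [pvColorLoop, h c (by simp), Bool.or_false]
    by_cases he : t = c
    · simp [he]
    · simp only [beq_iff_eq, he, if_false]
      exact ih (fun c hc => h c (by simp [hc]))

-- A's loop when every condition equals (head == c)
theorem pv_loop_contains (t head : String) (cs : List String)
    (h : ∀ c ∈ cs, ((t == c) || PySem.Str.startswith t (c ++ "_")) = (head == c)) :
    pvColorLoop t cs = if cs.contains head then head else t := by
  induction cs with
  | nil => simp [pvColorLoop]
  | cons c cs ih =>
    simp only [pvColorLoop, h c (by simp)]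
    by_cases he : head = c
    · simp [he]
    · rw [if_neg (by simp [he])]
      rw [ih (fun c hc => h c (by simp [hc]))]
      have hcc : (c :: cs).contains head = cs.contains head := by simp [he]
      rw [hcc]

-- String-to-Chars bridges for A's loop condition
theorem pv_beq_str (s c : String) : (s == c) = (s.toList == c.toList) := by
  apply Bool.eq_iff_iff.mpr
  simp [String.toList_inj]

theorem pv_startswith' (s c : String) :
    PySem.Str.startswith s (c ++ "_") = PySem.Chars.startswith s.toList (c.toList ++ ['_']) := by
  rw [PySem.Str.startswith_eq, String.toList_append]
  have h1 : ("_" : String).toList = ['_'] := by decide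
  rw [h1]

theorem pv_cond_iff_one (s c : String) (hc : '_' ∉ c.toList) :
    ((s == c) || PySem.Str.startswith s (c ++ "_")) = true ↔
      c.toList = s.toList.takeWhile (fun a => a != '_') := by
  rw [pv_beq_str, pv_startswith']
  exact pv_matches_one c.toList s.toList hc

theorem pv_cond_iff_two (s c : String) (b ds : List Char) (hb : '_' ∉ b)
    (hl : s.toList = "light".toList ++ '_' :: ds) (hc : c.toList = "light".toList ++ '_' :: b) :
    ((s == c) || PySem.Str.startswith s (c ++ "_")) = true ↔
      b = ds.takeWhile (fun a => a != '_') := by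
  rw [pv_beq_str, pv_startswith', hl, hc]
  have base := pv_matches_one b ds hb
  rw [← base]
  apply Bool.eq_iff_iff.mp
  apply Bool.eq_iff_iff.mpr
  constructor
  · intro h
    rcases Bool.or_eq_true_iff.mp h with h | h
    · apply Bool.or_eq_true_iff.mpr; left
      have : ds = b := by simpa using h
      simp [this]
    · apply Bool.or_eq_true_iff.mpr; right
      have hp := (PySem.Chars.startswith_iff _ _).mp h
      apply (PySem.Chars.startswith_iff _ _).mpr
      have e1 : ("light".toList ++ '_' :: b) ++ ['_'] = ("light".toList ++ ['_']) ++ (b ++ ['_']) := by simp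
      have e2 : "light".toList ++ '_' :: ds = ("light".toList ++ ['_']) ++ ds := by simp
      rw [e1, e2] at hp
      exact (List.prefix_append_right_inj _).mp hp
  · intro h
    rcases Bool.or_eq_true_iff.mp h with h | h
    · apply Bool.or_eq_true_iff.mpr; left
      have : ds = b := by simpa using h
      simp [this]
    · apply Bool.or_eq_true_iff.mpr; right
      have hp := (PySem.Chars.startswith_iff _ _).mp h
      apply (PySem.Chars.startswith_iff _ _).mpr
      have e1 : ("light".toList ++ '_' :: b) ++ ['_'] = ("light".toList ++ ['_']) ++ (b ++ ['_']) := by simp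
      have e2 : "light".toList ++ '_' :: ds = ("light".toList ++ ['_']) ++ ds := by simp
      rw [e1, e2]
      exact (List.prefix_append_right_inj _).mpr hp

-- decomposition of a string containing an underscore
theorem pv_decomp (l : List Char) (h : '_' ∈ l) :
    ∃ ds, l = l.takeWhile (fun a => a != '_') ++ '_' :: ds := by
  rcases hdw : l.dropWhile (fun a => a != '_') with _ | ⟨d, ds⟩
  · exfalso
    have hself : l.takeWhile (fun a => a != '_') = l := by
      conv_rhs => rw [← List.takeWhile_append_dropWhile (p := fun a => a != '_') (l := l)]
      rw [hdw]; simp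
    have := List.mem_takeWhile_imp (p := fun a => a != '_') (by rw [hself]; exact h)
    simp at this
  · have hd' : d = '_' := by
      have := List.head_dropWhile_not (p := fun a => a != '_') (l := l) (by simp [hdw])
      simpa [hdw] using this
    refine ⟨ds, ?_⟩
    conv_lhs => rw [← List.takeWhile_append_dropWhile (p := fun a => a != '_') (l := l)]
    rw [hdw, hd']


theorem pv_take_append {α : Type} (l1 l2 : List α) (n : ℕ) :
    List.take (l1.length + n) (l1 ++ l2) = l1 ++ List.take n l2 := by
  rw [List.take_append]
  simp

theorem pv_takeWhile_self (l : List Char) (h : '_' ∉ l) :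
    l.takeWhile (fun a => a != '_') = l := by
  rw [List.takeWhile_eq_self_iff]
  intro x hx
  simp only [bne_iff_ne, ne_eq]
  rintro rfl
  exact h hx

-- in Y2: a one-word colour condition equals the head test
theorem pv_cond_head (s c head : String) (hc : '_' ∉ c.toList)
    (hhead : head.toList = s.toList.takeWhile (fun a => a != '_')) :
    ((s == c) || PySem.Str.startswith s (c ++ "_")) = (head == c) := by
  apply Bool.eq_iff_iff.mpr
  rw [pv_cond_iff_one s c hc]
  constructor
  · intro h
    have : head = c := String.toList_inj.mp (by rw [hhead, ← h])
    simp [this]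
  · intro h
    have : head = c := by simpa using h
    rw [← hhead, ← this]

theorem pv_light_all : ∀ a ∈ "light".toList, (a != '_') = true := by
  have h : "light".toList = ['l','i','g','h','t'] := by decide
  rw [h]
  intro a ha
  fin_cases ha <;> rfl

-- a two-word colour condition forces the first word to be "light"
theorem pv_two_imp (s c : String) (b : List Char)
    (hc : c.toList = "light".toList ++ '_' :: b)
    (h : ((s == c) || PySem.Str.startswith s (c ++ "_")) = true) :
    s.toList.takeWhile (fun a => a != '_') = "light".toList := by
  have hall := pv_light_all
  rw [pv_beq_str, pv_startswith'] at h
  rcases Bool.or_eq_true_iff.mp h with h | h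
  · have hst : s.toList = c.toList := by simpa using h
    rw [hst, hc, pv_takeWhile_append _ _ _ _ hall (by simp)]
  · rcases (PySem.Chars.startswith_iff _ _).mp h with ⟨r, hr⟩
    have hst : s.toList = "light".toList ++ '_' :: (b ++ '_' :: r) := by
      rw [← hr, hc]; simp
    rw [hst, pv_takeWhile_append _ _ _ _ hall (by simp)]


-- the whole Y1 ("light_…") case, with `two` the already-computed two-word prefix
theorem pv_core_light (s two : String) (ds : List Char)
    (hl' : s.toList = "light".toList ++ '_' :: ds)
    (htwo : two.toList = "light".toList ++ '_' :: ds.takeWhile (fun a => a != '_')) :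
    pvColorLoop s pvColorPrefixes =
      if (two == "light_blue" || two == "light_gray") = true then two
      else if pvOneWordColors.contains "light" = true then "light" else s := by
  have hb1 : (two == "light_blue") = true ↔ ds.takeWhile (fun a => a != '_') = "blue".toList := by
    simp only [beq_iff_eq]
    constructor
    · intro h
      have h2 : "light".toList ++ '_' :: ds.takeWhile (fun a => a != '_')
          = "light".toList ++ '_' :: "blue".toList := by
        rw [← htwo, h]; decide
      simpa using List.append_cancel_left h2
    · intro h
      apply String.toList_inj.mp
      rw [htwo, h]; decide
  have hb2 : (two == "light_gray") = true ↔ ds.takeWhile (fun a => a != '_') = "gray".toList := by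
    simp only [beq_iff_eq]
    constructor
    · intro h
      have h2 : "light".toList ++ '_' :: ds.takeWhile (fun a => a != '_')
          = "light".toList ++ '_' :: "gray".toList := by
        rw [← htwo, h]; decide
      simpa using List.append_cancel_left h2
    · intro h
      apply String.toList_inj.mp
      rw [htwo, h]; decide
  by_cases hwb : ds.takeWhile (fun a => a != '_') = "blue".toList
  · rw [if_pos (Bool.or_eq_true_iff.mpr (Or.inl (hb1.mpr hwb)))]
    have htwoeq : two = "light_blue" := String.toList_inj.mp (by rw [htwo, hwb]; decide)
    rw [htwoeq]
    simp only [pvColorPrefixes, pvColorLoop]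
    rw [if_pos ((pv_cond_iff_two s "light_blue" "blue".toList ds (by decide) hl' (by decide)).mpr hwb.symm)]
  · have hlbf : ((s == "light_blue") || PySem.Str.startswith s ("light_blue" ++ "_")) = false := by
      apply Bool.eq_false_iff.mpr
      intro h
      exact hwb ((pv_cond_iff_two s "light_blue" "blue".toList ds (by decide) hl' (by decide)).mp h).symm
    by_cases hwg : ds.takeWhile (fun a => a != '_') = "gray".toList
    · rw [if_pos (Bool.or_eq_true_iff.mpr (Or.inr (hb2.mpr hwg)))]
      have htwoeq : two = "light_gray" := String.toList_inj.mp (by rw [htwo, hwg]; decide)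
      rw [htwoeq]
      simp only [pvColorPrefixes, pvColorLoop]
      rw [if_neg (by rw [hlbf]; simp)]
      rw [if_pos ((pv_cond_iff_two s "light_gray" "gray".toList ds (by decide) hl' (by decide)).mpr hwg.symm)]
    · have hlgf : ((s == "light_gray") || PySem.Str.startswith s ("light_gray" ++ "_")) = false := by
        apply Bool.eq_false_iff.mpr
        intro h
        exact hwg ((pv_cond_iff_two s "light_gray" "gray".toList ds (by decide) hl' (by decide)).mp h).symm
      rw [if_neg (by rw [Bool.or_eq_true_iff]; rintro (h | h); exacts [hwb (hb1.mp h), hwg (hb2.mp h)])]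
      rw [if_neg (by decide)]
      have htwS : s.toList.takeWhile (fun a => a != '_') = "light".toList := by
        rw [hl', pv_takeWhile_append _ _ _ '_' pv_light_all (by simp)]
      have honef : ∀ (c : String), '_' ∉ c.toList → c.toList ≠ "light".toList →
          ((s == c) || PySem.Str.startswith s (c ++ "_")) = false := by
        intro c h1 h2
        apply Bool.eq_false_iff.mpr
        intro h
        apply h2
        rw [(pv_cond_iff_one s c h1).mp h, htwS]
      simp only [pvColorPrefixes, pvColorLoop, hlbf, hlgf,
        honef "orange" (by decide) (by decide), honef "magenta" (by decide) (by decide),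
        honef "yellow" (by decide) (by decide), honef "lime" (by decide) (by decide),
        honef "pink" (by decide) (by decide), honef "cyan" (by decide) (by decide),
        honef "purple" (by decide) (by decide), honef "blue" (by decide) (by decide),
        honef "brown" (by decide) (by decide), honef "green" (by decide) (by decide),
        honef "red" (by decide) (by decide), honef "black" (by decide) (by decide),
        honef "white" (by decide) (by decide), honef "gray" (by decide) (by decide)]
      simp

-- ===== main core lemma =====
theorem pv_core (s : String) :
    (if s == "" then "" else pvColorLoop s pvColorPrefixes) = pvAltKey s := by
  unfold pvAltKey
  by_cases hs : s = ""
  · simp [hs]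
  · rw [if_neg (by simpa using hs), if_neg (by simpa using hs)]
    have hUnd : ("_" : String).toList = ['_'] := by decide
    by_cases hus : '_' ∈ s.toList
    · -- '_' occurs in s
      obtain ⟨ds, hl⟩ := pv_decomp s.toList hus
      have hfind : PySem.Str.find s "_" = ((s.toList.takeWhile (fun a => a != '_')).length : ℤ) := by
        rw [PySem.Str.find_eq, hUnd, pv_find_underscore, if_pos hus]
      have hnotlt : ¬ (PySem.Str.find s "_" < 0) := by rw [hfind]; simp
      have hhead : (PySem.Str.slice s none (some (PySem.Str.find s "_"))).toList
          = s.toList.takeWhile (fun a => a != '_') := by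
        rw [hfind, PySem.Str.toList_slice, PySem.Chars.slice_eq_listSlice,
            PySem.List.slice_to _ (by simp)]
        simp only [Int.toNat_natCast]
        exact (List.prefix_iff_eq_take.mp (List.takeWhile_prefix _)).symm
      dsimp only
      rw [if_neg hnotlt]
      by_cases hY : s.toList.takeWhile (fun a => a != '_') = "light".toList
      · -- head is "light"
        have hl' : s.toList = "light".toList ++ '_' :: ds := by rw [← hY]; exact hl
        have hhead' : PySem.Str.slice s none (some (PySem.Str.find s "_")) = "light" :=
          String.toList_inj.mp (by rw [hhead, hY])
        rw [hhead', if_pos (by decide)]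
        have hlen6 : s.toList.length = 6 + ds.length := by rw [hl']; simp; omega
        have hdrop6 : s.toList.drop 6 = ds := by
          rw [hl']
          have : "light".toList = ['l','i','g','h','t'] := by decide
          rw [this]
          simp
        have h61 : (PySem.Str.find s "_" + 1) = ((6:ℕ):ℤ) := by
          rw [hfind, hY]
          decide
        have hffbase : PySem.Str.findFrom s "_" (PySem.Str.find s "_" + 1)
            = if PySem.Chars.find ds ['_'] = -1 then -1 else 6 + PySem.Chars.find ds ['_'] := by
          rw [h61, PySem.Str.findFrom_eq, hUnd,
              PySem.Chars.findFrom_natCast s.toList ['_'] 6 (by omega), hdrop6]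
          norm_num
        by_cases hds : '_' ∈ ds
        · -- a second underscore exists
          have hfds : PySem.Chars.find ds ['_'] = ((ds.takeWhile (fun a => a != '_')).length : ℤ) := by
            rw [pv_find_underscore, if_pos hds]
          have hff : PySem.Str.findFrom s "_" (PySem.Str.find s "_" + 1)
              = (6 : ℤ) + ((ds.takeWhile (fun a => a != '_')).length : ℤ) := by
            rw [hffbase, hfds]
            rw [if_neg (by simp)]
          rw [hff, if_neg (show ¬((6:ℤ) + ((ds.takeWhile (fun a => a != '_')).length : ℤ) < 0) by omega)]
          have htwo : (PySem.Str.slice s none (some ((6 : ℤ) + ((ds.takeWhile (fun a => a != '_')).length : ℤ)))).toList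
              = "light".toList ++ '_' :: ds.takeWhile (fun a => a != '_') := by
            rw [PySem.Str.toList_slice, PySem.Chars.slice_eq_listSlice,
                PySem.List.slice_to _ (by omega)]
            have ht : ((6:ℤ) + ((ds.takeWhile (fun a => a != '_')).length : ℤ)).toNat
                = 6 + (ds.takeWhile (fun a => a != '_')).length := by omega
            rw [ht]
            have e : s.toList = ("light".toList ++ ['_']) ++ ds := by rw [hl']; simp
            have e6 : (6 : ℕ) = ("light".toList ++ ['_']).length := by decide
            rw [e, e6, pv_take_append]
            have : List.take (ds.takeWhile (fun a => a != '_')).length ds = ds.takeWhile (fun a => a != '_') :=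
              (List.prefix_iff_eq_take.mp (List.takeWhile_prefix _)).symm
            rw [this]
            simp
          exact pv_core_light s _ ds hl' htwo
        · -- no second underscore
          have hfds : PySem.Chars.find ds ['_'] = -1 := by
            rw [pv_find_underscore, if_neg hds]
          have hff : PySem.Str.findFrom s "_" (PySem.Str.find s "_" + 1) = -1 := by
            rw [hffbase, hfds]; simp
          rw [hff, if_pos (show ((-1:ℤ) < 0) by norm_num)]
          have htwo : s.toList = "light".toList ++ '_' :: ds.takeWhile (fun a => a != '_') := by
            rw [pv_takeWhile_self ds hds]; exact hl'
          exact pv_core_light s s ds hl' htwo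
      · -- head is not "light"
        have hheadne : ¬ ((PySem.Str.slice s none (some (PySem.Str.find s "_")) == "light") = true) := by
          simp only [beq_iff_eq]
          intro h
          exact hY (by rw [← hhead, h])
        rw [if_neg hheadne]
        have hnous : '_' ∉ s.toList.takeWhile (fun a => a != '_') := by
          intro h
          have := List.mem_takeWhile_imp (p := fun a => a != '_') h
          simp at this
        have hcond : ∀ c ∈ pvColorPrefixes,
            ((s == c) || PySem.Str.startswith s (c ++ "_"))
              = (PySem.Str.slice s none (some (PySem.Str.find s "_")) == c) := by
          intro c hcmem
          by_cases hc1 : '_' ∈ c.toList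
          · -- a two-word colour: both sides false
            have hcl : c = "light_blue" ∨ c = "light_gray" := by
              simp only [pvColorPrefixes] at hcmem
              fin_cases hcmem <;>
                first | exact Or.inl rfl | exact Or.inr rfl | exact absurd hc1 (by decide)
            have hLHS : ((s == c) || PySem.Str.startswith s (c ++ "_")) = false := by
              apply Bool.eq_false_iff.mpr
              intro h
              rcases hcl with rfl | rfl
              · exact hY (pv_two_imp s _ "blue".toList (by decide) h)
              · exact hY (pv_two_imp s _ "gray".toList (by decide) h)
            have hRHS : (PySem.Str.slice s none (some (PySem.Str.find s "_")) == c) = false := by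
              apply Bool.eq_false_iff.mpr
              intro h
              have h' : PySem.Str.slice s none (some (PySem.Str.find s "_")) = c := by simpa using h
              apply hnous
              rw [← hhead, h']
              rcases hcl with rfl | rfl <;> decide
            rw [hLHS, hRHS]
          · exact pv_cond_head s c _ hc1 hhead
        rw [pv_loop_contains s _ pvColorPrefixes hcond]
        have hc16 : pvColorPrefixes.contains (PySem.Str.slice s none (some (PySem.Str.find s "_")))
            = pvOneWordColors.contains (PySem.Str.slice s none (some (PySem.Str.find s "_"))) := by
          apply Bool.eq_iff_iff.mpr
          rw [List.contains_iff_mem, PySem.Set.contains_iff]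
          simp only [pvOneWordColors]
          rw [PySem.Set.mem_ofList]
          constructor
          · intro h
            simp only [pvColorPrefixes, List.mem_cons] at h
            rcases h with h|h|h
            · exfalso; apply hnous; rw [← hhead, h]; decide
            · exfalso; apply hnous; rw [← hhead, h]; decide
            · simpa using h
          · intro h
            simp only [pvColorPrefixes, List.mem_cons]
            right; right
            simpa using h
        rw [hc16]
    · -- no underscore: A's loop falls through (or returns s itself), B returns s
      have hfind : PySem.Str.find s "_" = -1 := by
        rw [PySem.Str.find_eq, hUnd, pv_find_underscore, if_neg hus]
      have hloop : pvColorLoop s pvColorPrefixes = s := by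
        apply pv_loop_self
        intro c _
        apply Bool.eq_false_iff.mpr
        intro htrue
        rw [pv_startswith'] at htrue
        have hp := (PySem.Chars.startswith_iff _ _).mp htrue
        exact hus (hp.sublist.subset (by simp))
      rw [hloop, hfind]
      dsimp only
      have hff : PySem.Str.findFrom s "_" (-1 + 1) = -1 := by
        have h0 : ((-1:ℤ) + 1) = ((0:ℕ):ℤ) := by norm_num
        rw [h0, PySem.Str.findFrom_eq, hUnd, PySem.Chars.findFrom_natCast s.toList ['_'] 0 (by simp)]
        rw [List.drop_zero, pv_find_underscore, if_neg hus]
        simp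
      rw [if_pos (show ((-1:ℤ) < 0) from by norm_num), hff]
      by_cases hlight : s = "light"
      · rw [if_pos (by simp [hlight]), if_pos (show ((-1:ℤ) < 0) from by norm_num)]
        rw [if_neg (by simp [hlight])]
        simp
      · rw [if_neg (by simp [hlight])]
        simp

-- ===== VERDICT (by name: the statement is the Claim_ definition above) =====
theorem block_to_color_key_spec : Claim_equal_block_to_color_key := by
  intro b _
  show block_to_color_key b = block_to_color_key_alt b
  unfold block_to_color_key block_to_color_key_alt normalize_block_id
  exact pv_core _
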